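-- pv_equiv track=rewrite | github.com/Trancendos/infinity-adminOS | backend/routers/savania.py | _assess_crisis_level
-- ===== SOURCE A (Python) =====
-- from enum import Enum
--
-- class CrisisLevel(str, Enum):
--     NONE = "none"
--     WATCH = "watch"             # Subtle indicators, monitor
--     CONCERN = "concern"         # Moderate indicators, gentle check-in
--     ALERT = "alert"             # Significant indicators, active support
--     CRITICAL = "critical"       # Immediate safety concern
--
-- _CRISIS_INDICATORS = {
--     CrisisLevel.CRITICAL: [
--         "suicide", "kill myself", "end my life", "want to die",
--         "no reason to live", "better off dead",
--     ],
--     CrisisLevel.ALERT: [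
--         "self harm", "hurt myself", "cutting", "overdose",
--         "can't go on", "give up", "hopeless",
--     ],
--     CrisisLevel.CONCERN: [
--         "worthless", "burden", "alone", "nobody cares",
--         "can't cope", "falling apart", "breaking down",
--     ],
--     CrisisLevel.WATCH: [
--         "struggling", "overwhelmed", "exhausted", "anxious",
--         "depressed", "scared", "lost",
--     ],
-- }
--
-- def _assess_crisis_level(text: str) -> CrisisLevel:
--     """
--     Assess crisis level from message content.
--     Production: fine-tuned NLP model with clinical validation.
--     """
--     text_lower = text.lower()
--     for level in [CrisisLevel.CRITICAL, CrisisLevel.ALERT, CrisisLevel.CONCERN, CrisisLevel.WATCH]: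
--         indicators = _CRISIS_INDICATORS.get(level, [])
--         for indicator in indicators:
--             if indicator in text_lower:
--                 return level
--     return CrisisLevel.NONE
-- ===== SOURCE B (Python) =====
-- from enum import Enum
--
-- class CrisisLevel(str, Enum):
--     NONE = "none"
--     WATCH = "watch"
--     CONCERN = "concern"
--     ALERT = "alert"
--     CRITICAL = "critical"
--
-- _CRISIS_INDICATORS = {
--     CrisisLevel.CRITICAL: [
--         "suicide", "kill myself", "end my life", "want to die",
--         "no reason to live", "better off dead",
--     ],
--     CrisisLevel.ALERT: [
--         "self harm", "hurt myself", "cutting", "overdose",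
--         "can't go on", "give up", "hopeless",
--     ],
--     CrisisLevel.CONCERN: [
--         "worthless", "burden", "alone", "nobody cares",
--         "can't cope", "falling apart", "breaking down",
--     ],
--     CrisisLevel.WATCH: [
--         "struggling", "overwhelmed", "exhausted", "anxious",
--         "depressed", "scared", "lost",
--     ],
-- }
--
-- _PRIORITY = {CrisisLevel.CRITICAL: 4, CrisisLevel.ALERT: 3,
--              CrisisLevel.CONCERN: 2, CrisisLevel.WATCH: 1}
--
-- def _assess_crisis_level(text: str) -> CrisisLevel:
--     text_lower = text.lower()
--     matched = [level for level, indicators in _CRISIS_INDICATORS.items()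
--                if any(ind in text_lower for ind in indicators)]
--     best, best_rank = CrisisLevel.NONE, 0
--     for level in matched:
--         if _PRIORITY[level] > best_rank:
--             best, best_rank = level, _PRIORITY[level]
--     return best
-- ===== Notes on version B (the rewrite author's own statement) =====
-- stated objective: alternative
-- what changed: Replaces the ordered early-return scan over levels with a collect-then-select decomposition: first compute the list of ALL levels whose indicators match, then pick the highest-priority one via an explicit numeric ranking fold.
import Mathlib
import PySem

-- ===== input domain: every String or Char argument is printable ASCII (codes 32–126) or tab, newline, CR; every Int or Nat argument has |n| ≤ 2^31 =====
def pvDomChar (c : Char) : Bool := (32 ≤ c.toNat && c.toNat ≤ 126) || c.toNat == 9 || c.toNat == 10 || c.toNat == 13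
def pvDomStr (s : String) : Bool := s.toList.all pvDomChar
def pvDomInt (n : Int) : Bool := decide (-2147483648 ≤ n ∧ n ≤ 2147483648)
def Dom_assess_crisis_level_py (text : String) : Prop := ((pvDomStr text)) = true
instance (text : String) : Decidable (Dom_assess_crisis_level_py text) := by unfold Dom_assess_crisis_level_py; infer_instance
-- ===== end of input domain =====

-- B replaces A's ordered early-return scan with collect-all-matching-levels then select-max-priority; objective: alternative decomposition, same cost.


-- ===== PORT A =====
-- the dict _CRISIS_INDICATORS, in insertion (= priority) order, as A iterates it
def pvCritical : List String :=
  ["suicide", "kill myself", "end my life", "want to die", "no reason to live", "better off dead"]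
def pvAlert : List String :=
  ["self harm", "hurt myself", "cutting", "overdose", "can't go on", "give up", "hopeless"]
def pvConcern : List String :=
  ["worthless", "burden", "alone", "nobody cares", "can't cope", "falling apart", "breaking down"]
def pvWatch : List String :=
  ["struggling", "overwhelmed", "exhausted", "anxious", "depressed", "scared", "lost"]

def pvLevelsA : List (String × List String) :=
  [("critical", pvCritical), ("alert", pvAlert), ("concern", pvConcern), ("watch", pvWatch)]

-- A's inner loop: first indicator contained in text_lower triggers the level
def pvScanInds (inds : List String) (tl : String) : Bool :=
  match inds with
  | [] => false
  | i :: rest => if PySem.Str.isIn i tl then true else pvScanInds rest tl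

-- A's outer loop with early return
def pvLoopA (levels : List (String × List String)) (tl : String) : String :=
  match levels with
  | [] => "none"
  | (lvl, inds) :: rest => if pvScanInds inds tl then lvl else pvLoopA rest tl

def assess_crisis_level_py (text : String) : String :=
  pvLoopA pvLevelsA (PySem.Str.lower text)

-- ===== PORT B =====
-- B: levels with their numeric priority ranks
def pvEntriesB : List (String × Nat × List String) :=
  [("critical", 4, pvCritical), ("alert", 3, pvAlert), ("concern", 2, pvConcern), ("watch", 1, pvWatch)]

def assess_crisis_level_py_alt (text : String) : String :=
  let tl := PySem.Str.lower text
  let matched := pvEntriesB.filter (fun e => e.2.2.any (fun i => PySem.Str.isIn i tl))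
  (matched.foldl (fun best e => if e.2.1 > best.2 then (e.1, e.2.1) else best) ("none", 0)).1

-- ===== PRECONDITION & SPEC =====
def Spec_assess_crisis_level_py (text : String) (out : String) : Prop := out = assess_crisis_level_py_alt text
instance (text : String) (out : String) : Decidable (Spec_assess_crisis_level_py text out) := by unfold Spec_assess_crisis_level_py; infer_instance

-- ===== CLAIM (what is proved, stated in full; the proofs are below) =====
def Claim_equal_assess_crisis_level_py : Prop := ∀ (text : String), Dom_assess_crisis_level_py text → Spec_assess_crisis_level_py text (assess_crisis_level_py text)

-- ===== LEMMAS AND PROOFS =====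
theorem pvScanInds_eq_any (inds : List String) (tl : String) :
    pvScanInds inds tl = inds.any (fun i => PySem.Str.isIn i tl) := by
  induction inds with
  | nil => rfl
  | cons i rest ih =>
      simp only [pvScanInds, List.any_cons, ih]
      cases PySem.Str.isIn i tl <;> simp

-- ===== VERDICT (by name: the statement is the Claim_ definition above) =====
theorem assess_crisis_level_py_spec : Claim_equal_assess_crisis_level_py := by
  intro text _
  unfold Spec_assess_crisis_level_py assess_crisis_level_py assess_crisis_level_py_alt
  set tl := PySem.Str.lower text with htl
  cases hc : pvCritical.any (fun i => PySem.Str.isIn i tl) <;>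
  cases ha : pvAlert.any (fun i => PySem.Str.isIn i tl) <;>
  cases ho : pvConcern.any (fun i => PySem.Str.isIn i tl) <;>
  cases hw : pvWatch.any (fun i => PySem.Str.isIn i tl) <;>
    simp only [pvLoopA, pvLevelsA, pvEntriesB, pvScanInds_eq_any, hc, ha, ho, hw,
          List.filter_cons, List.filter_nil, List.foldl_cons, List.foldl_nil,
          if_true] <;> rfl
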